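-- pv_equiv track=rewrite | github.com/mauriciodileo87/Reporte-Facturacion-CC | backend/core/planilla_area_recaudacion.py | _mergear_semanas_sin_pisar
-- ===== SOURCE A (Python) =====
-- def _normalizar_mapa_semanas(raw: dict | None) -> dict[int, list[int]]:
--     semanas: dict[int, set[int]] = {}
--     if not isinstance(raw, dict):
--         return {}
--
--     for k, vals in raw.items():
--         try:
--             sem = int(str(k).strip().lower().replace("semana", "").strip())
--         except Exception:
--             continue
--
--         if not isinstance(vals, list):
--             continue
--
--         bucket = semanas.setdefault(sem, set())
--         for v in vals:
--             try:
--                 bucket.add(int(v))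
--             except Exception:
--                 continue
--
--     return {sem: sorted(sorteos) for sem, sorteos in sorted(semanas.items())}
--
-- def _mergear_semanas_sin_pisar(
--     existentes: dict[int, list[int]] | None,
--     nuevas: dict[int, list[int]] | None,
-- ) -> dict[int, list[int]]:
--     """
--     Merge estable y *no destructivo*.
--
--     - Nunca achica el mapa (no borra semanas existentes).
--     - Nunca mueve un sorteo de semana: si ya estaba asignado a una semana en
--       'existentes', se respeta esa asignación.
--     - Solo agrega sorteos NUEVOS (que no existían en ninguna semana previa).
--
--     Esto blinda la segmentación del PJU y evita que la operatoria (pasar tickets /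
--     reporte / SFA) termine colapsando semanas.
--     """
--     prev = _normalizar_mapa_semanas(existentes or {})
--     cur = _normalizar_mapa_semanas(nuevas or {})
--
--     # sorteo -> semana asignada (prioridad: existentes)
--     asignacion: dict[int, int] = {}
--     out: dict[int, list[int]] = {sem: list(vals) for sem, vals in sorted(prev.items())}
--
--     for sem, vals in sorted(prev.items()):
--         for v in vals:
--             try:
--                 s = int(v)
--             except Exception:
--                 continue
--             asignacion.setdefault(s, sem)
--
--     # Asegurar que existan claves de semanas nuevas (aunque la lista quede vacía)
--     for sem in sorted(cur.keys()):
--         out.setdefault(sem, list(out.get(sem, [])))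
--
--     for sem, vals in sorted(cur.items()):
--         bucket = out.setdefault(sem, [])
--         bucket_set = {int(v) for v in bucket if str(v).strip()}
--         for v in vals:
--             try:
--                 s = int(v)
--             except Exception:
--                 continue
--             # Si ya existía en alguna semana previa, NO se mueve.
--             if s in asignacion:
--                 continue
--             if s in bucket_set:
--                 continue
--             bucket.append(s)
--             bucket_set.add(s)
--             asignacion[s] = sem
--
--     out_norm: dict[int, list[int]] = {}
--     for sem, vals in sorted(out.items()):
--         uniq = sorted({int(v) for v in vals if str(v).strip()})
--         if uniq:
--             out_norm[int(sem)] = uniq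
--     return out_norm
-- ===== SOURCE B (Python) =====
-- def _normalizar_mapa_semanas(raw: dict | None) -> dict[int, list[int]]:
--     semanas: dict[int, set[int]] = {}
--     if not isinstance(raw, dict):
--         return {}
--
--     for k, vals in raw.items():
--         try:
--             sem = int(str(k).strip().lower().replace("semana", "").strip())
--         except Exception:
--             continue
--
--         if not isinstance(vals, list):
--             continue
--
--         bucket = semanas.setdefault(sem, set())
--         for v in vals:
--             try:
--                 bucket.add(int(v))
--             except Exception:
--                 continue
--
--     return {sem: sorted(sorteos) for sem, sorteos in sorted(semanas.items())}
--
--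
-- def _mergear_semanas_sin_pisar(existentes, nuevas):
--     # Value-centric merge: instead of scanning week by week with a growing
--     # "already placed" set, first invert cur into a per-sorteo map giving each
--     # genuinely-new sorteo its minimal cur week, then group that map back into
--     # the prev buckets.
--     prev = _normalizar_mapa_semanas(existentes or {})
--     cur = _normalizar_mapa_semanas(nuevas or {})
--
--     prev_vals = {v for vals in prev.values() for v in vals}
--
--     # sorteo -> its smallest cur week, only for sorteos not pinned by prev
--     week_of: dict[int, int] = {}
--     for sem, vals in cur.items():
--         for s in vals:
--             if s not in prev_vals and (s not in week_of or sem < week_of[s]):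
--                 week_of[s] = sem
--
--     merged = {sem: set(vals) for sem, vals in prev.items()}
--     for s, sem in week_of.items():
--         merged.setdefault(sem, set()).add(s)
--
--     return {sem: sorted(vals) for sem, vals in sorted(merged.items()) if vals}
-- ===== Notes on version B (the rewrite author's own statement) =====
-- stated objective: alternative
-- what changed: Replaces A's week-by-week scan with a growing assignment dict and parallel bucket/bucket_set bookkeeping by a value-centric inversion: one pass builds a per-sorteo map to its minimal cur week (only for sorteos absent from prev), which is then grouped back into the prev buckets; no seen-set grows during the merge and no empty-key or re-normalisation passes remain.
import Mathlib
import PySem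

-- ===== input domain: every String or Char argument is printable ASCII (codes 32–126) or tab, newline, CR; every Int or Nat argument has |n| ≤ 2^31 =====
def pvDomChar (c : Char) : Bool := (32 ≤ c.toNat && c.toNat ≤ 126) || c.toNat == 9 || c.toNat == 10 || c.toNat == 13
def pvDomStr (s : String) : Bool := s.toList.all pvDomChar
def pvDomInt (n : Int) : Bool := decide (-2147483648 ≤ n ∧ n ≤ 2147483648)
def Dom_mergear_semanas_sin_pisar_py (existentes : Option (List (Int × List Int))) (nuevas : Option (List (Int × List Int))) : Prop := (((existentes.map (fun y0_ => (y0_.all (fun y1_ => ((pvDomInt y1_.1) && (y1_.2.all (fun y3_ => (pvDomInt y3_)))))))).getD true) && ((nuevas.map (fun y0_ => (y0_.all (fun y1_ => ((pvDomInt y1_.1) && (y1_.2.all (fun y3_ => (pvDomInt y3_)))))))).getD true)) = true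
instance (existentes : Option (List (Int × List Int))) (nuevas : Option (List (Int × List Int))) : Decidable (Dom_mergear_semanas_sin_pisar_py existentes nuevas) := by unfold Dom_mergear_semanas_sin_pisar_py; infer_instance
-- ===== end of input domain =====

-- B replaces A's week-by-week scan (growing assignment dict + parallel bucket/bucket_set
-- bookkeeping) by a value-centric inversion: per-sorteo minimal-cur-week map, then grouping;
-- return-value equivalence with A is proved on all inputs.

-- ===== PORT A =====
-- Shared helper _normalizar_mapa_semanas (identical in A's module and in B).
-- Under the type convention keys/values are Int, so: `int(str(k).strip().lower().replace("semana","").strip())`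
-- never raises and is the identity (str(k) is a plain decimal numeral, untouched by strip/lower/replace),
-- and `int(v)` is the identity; `bucket = semanas.setdefault(sem, set()); bucket.add(...)` mutates the stored
-- set in place, which is exactly `Dict.modify sem [] (fold of Set.add)`.
def pvNormalizar (raw : List (Int × List Int)) : List (Int × List Int) :=
  -- raw is a Python dict (assoc list): collapse duplicate keys the dict way before `raw.items()`
  let semanas : PySem.Dict Int (PySem.Set Int) :=
    (PySem.Dict.ofList raw).items.foldl (fun d kv => d.modify kv.1 [] (fun bucket => kv.2.foldl (fun b v => PySem.Set.add b v) bucket))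
      PySem.Dict.empty
  (PySem.List.sorted semanas.items (fun p => p.1) false).map
    (fun p => (p.1, PySem.List.sorted p.2 (fun x => x) false))

-- state of A's main loop: (out, asignacion); inner state adds bucket_set
-- `bucket.append(s)` mutates the list stored in out: Dict.modify; `str(v).strip()` of an int is never blank,
-- so `{int(v) for v in bucket if str(v).strip()}` is Set.ofList bucket.
def pvStepA (sem : Int) (st : PySem.Dict Int (List Int) × PySem.Dict Int Int × PySem.Set Int) (s : Int) :
    PySem.Dict Int (List Int) × PySem.Dict Int Int × PySem.Set Int :=
  if st.2.1.contains s then st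
  else if PySem.Set.contains st.2.2 s then st
  else (st.1.modify sem [] (fun b => b ++ [s]), st.2.1.insert s sem, PySem.Set.add st.2.2 s)

def pvWeekA (st : PySem.Dict Int (List Int) × PySem.Dict Int Int) (p : Int × List Int) :
    PySem.Dict Int (List Int) × PySem.Dict Int Int :=
  let out := st.1.setdefault p.1 []          -- bucket = out.setdefault(sem, [])
  let bucket := out.getD p.1 []
  let r := p.2.foldl (pvStepA p.1) (out, st.2, PySem.Set.ofList bucket)
  (r.1, r.2.1)

def mergear_semanas_sin_pisar_py (existentes : Option (List (Int × List Int))) (nuevas : Option (List (Int × List Int))) : List (Int × List Int) :=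
  let prev := pvNormalizar (existentes.getD [])   -- `existentes or {}`: None → {}
  let cur := pvNormalizar (nuevas.getD [])
  -- asignacion: for sem, vals in sorted(prev.items()): for v in vals: asignacion.setdefault(int(v), sem)
  let asign0 : PySem.Dict Int Int :=
    (PySem.List.sorted prev (fun p => p.1) false).foldl
      (fun a p => p.2.foldl (fun a s => a.setdefault s p.1) a) PySem.Dict.empty
  -- out = {sem: list(vals) for sem, vals in sorted(prev.items())}
  let out0 : PySem.Dict Int (List Int) :=
    (PySem.List.sorted prev (fun p => p.1) false).foldl (fun d p => d.insert p.1 p.2) PySem.Dict.empty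
  -- for sem in sorted(cur.keys()): out.setdefault(sem, list(out.get(sem, [])))
  let out1 := (PySem.List.sorted (cur.map (fun p => p.1)) (fun x => x) false).foldl
    (fun d sem => d.setdefault sem (d.getD sem [])) out0
  let st := (PySem.List.sorted cur (fun p => p.1) false).foldl pvWeekA (out1, asign0)
  -- out_norm: uniq = sorted({int(v) for v in vals if str(v).strip()}); if uniq: out_norm[int(sem)] = uniq
  let out_norm := (PySem.List.sorted st.1.items (fun p => p.1) false).foldl
    (fun d p =>
      let uniq := PySem.List.sorted (PySem.Set.ofList p.2) (fun x => x) false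
      if uniq ≠ [] then d.insert p.1 uniq else d) PySem.Dict.empty
  out_norm.items

-- ===== PORT B =====
-- week_of update: `if s not in prev_vals and (s not in week_of or sem < week_of[s]): week_of[s] = sem`
def pvStepW (prevVals : PySem.Set Int) (sem : Int) (w : PySem.Dict Int Int) (s : Int) : PySem.Dict Int Int :=
  if !PySem.Set.contains prevVals s && (match w.get? s with | none => true | some t => decide (sem < t))
  then w.insert s sem else w

def mergear_semanas_sin_pisar_py_alt (existentes : Option (List (Int × List Int))) (nuevas : Option (List (Int × List Int))) : List (Int × List Int) :=
  let prev := pvNormalizar (existentes.getD [])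
  let cur := pvNormalizar (nuevas.getD [])
  -- prev_vals = {v for vals in prev.values() for v in vals}
  let prev_vals : PySem.Set Int := prev.foldl (fun s p => PySem.Set.update s p.2) []
  -- sorteo -> its smallest cur week (cur.items() is iterated in dict order)
  let week_of : PySem.Dict Int Int :=
    cur.foldl (fun w p => p.2.foldl (pvStepW prev_vals p.1) w) PySem.Dict.empty
  -- merged = {sem: set(vals) for sem, vals in prev.items()}
  let merged0 : PySem.Dict Int (PySem.Set Int) :=
    prev.foldl (fun d p => d.insert p.1 (PySem.Set.ofList p.2)) PySem.Dict.empty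
  -- for s, sem in week_of.items(): merged.setdefault(sem, set()).add(s)
  let merged := week_of.items.foldl (fun d q => d.modify q.2 [] (fun b => PySem.Set.add b q.1)) merged0
  -- {sem: sorted(vals) for sem, vals in sorted(merged.items()) if vals}  (distinct keys: emitted in order)
  (PySem.List.sorted merged.items (fun p => p.1) false).foldl
    (fun acc p => if p.2 ≠ [] then acc ++ [(p.1, PySem.List.sorted p.2 (fun x => x) false)] else acc) []

-- ===== PRECONDITION & SPEC =====
def Spec_mergear_semanas_sin_pisar_py (existentes : Option (List (Int × List Int))) (nuevas : Option (List (Int × List Int))) (out : List (Int × List Int)) : Prop := out = mergear_semanas_sin_pisar_py_alt existentes nuevas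
instance (existentes : Option (List (Int × List Int))) (nuevas : Option (List (Int × List Int))) (out : List (Int × List Int)) : Decidable (Spec_mergear_semanas_sin_pisar_py existentes nuevas out) := by unfold Spec_mergear_semanas_sin_pisar_py; infer_instance

-- ===== CLAIM (what is proved, stated in full; the proofs are below) =====
def Claim_equal_mergear_semanas_sin_pisar_py : Prop := ∀ (existentes : Option (List (Int × List Int))) (nuevas : Option (List (Int × List Int))), Dom_mergear_semanas_sin_pisar_py existentes nuevas → Spec_mergear_semanas_sin_pisar_py existentes nuevas (mergear_semanas_sin_pisar_py existentes nuevas)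

-- ===== LEMMAS AND PROOFS =====

-- Proof-only middle form: A's merge re-expressed with a single seen set (sets instead of
-- parallel list+set bookkeeping).  A is first proved equal to pvMid, then pvMid to B's port.
def pvStepB (sem : Int) (st : PySem.Dict Int (PySem.Set Int) × PySem.Set Int) (s : Int) :
    PySem.Dict Int (PySem.Set Int) × PySem.Set Int :=
  if PySem.Set.contains st.2 s then st
  else (st.1.modify sem [] (fun b => PySem.Set.add b s), PySem.Set.add st.2 s)

def pvMid (existentes : Option (List (Int × List Int))) (nuevas : Option (List (Int × List Int))) : List (Int × List Int) :=
  let prev := pvNormalizar (existentes.getD [])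
  let cur := pvNormalizar (nuevas.getD [])
  let seed : PySem.Dict Int (PySem.Set Int) × PySem.Set Int :=
    prev.foldl (fun st p => (st.1.insert p.1 (PySem.Set.ofList p.2), PySem.Set.update st.2 p.2))
      (PySem.Dict.empty, [])
  let st := (PySem.List.sorted cur (fun p => p.1) false).foldl
    (fun st p => p.2.foldl (pvStepB p.1) st) seed
  (PySem.List.sorted st.1.items (fun p => p.1) false).foldl
    (fun acc p => if p.2 ≠ [] then acc ++ [(p.1, PySem.List.sorted p.2 (fun x => x) false)] else acc) []

-- the relation carried through the main loop of A and pvMid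
def pvRel (outA : PySem.Dict Int (List Int)) (asA : PySem.Dict Int Int)
    (resB : PySem.Dict Int (PySem.Set Int)) (asB : PySem.Set Int) : Prop :=
  (∀ s, asA.contains s = true ↔ s ∈ asB) ∧
  (∀ k v, v ∈ outA.getD k [] ↔ v ∈ resB.getD k []) ∧
  (∀ k v, v ∈ outA.getD k [] → asA.contains v = true) ∧
  (∀ k, (resB.getD k []).Nodup) ∧
  outA.keys.Nodup ∧ resB.keys.Nodup

theorem pv_getD_eq_get? {ν : Type} (d : PySem.Dict Int ν) (k : Int) (d0 : ν) :
    d.getD k d0 = (d.get? k).getD d0 := rfl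

theorem pv_keys_nodup_modify {ν : Type} (d : PySem.Dict Int ν) (k : Int) (d0 : ν) (f : ν → ν)
    (h : d.keys.Nodup) : (d.modify k d0 f).keys.Nodup := by
  have := PySem.Dict.nodup_keys_foldl_modify_key (l := [()]) (key := fun _ => k) (d0 := d0)
    (f := fun _ _ => f) (d := d) h
  simpa using this

theorem pv_keys_nodup_setdefault {ν : Type} (d : PySem.Dict Int ν) (k : Int) (v : ν)
    (h : d.keys.Nodup) : (d.setdefault k v).keys.Nodup := by
  rw [PySem.Dict.keys_setdefault]
  split
  · exact h
  · next hc =>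
    have hk : k ∉ d.keys := fun hm => hc ((PySem.Dict.contains_iff_mem_keys d k).2 hm)
    simp only [List.nodup_append, List.nodup_cons, List.not_mem_nil, not_false_eq_true,
      List.nodup_nil, and_true, true_and]
    exact ⟨h, fun a ha b hb => by
      simp only [List.mem_singleton] at hb
      subst hb
      exact fun he => hk (he ▸ ha)⟩

theorem pv_getD_setdefault_nil {ν : Type} (d : PySem.Dict Int (List ν)) (j k : Int) :
    (d.setdefault j []).getD k [] = d.getD k [] := by
  by_cases hk : k = j
  · subst hk; exact PySem.Dict.getD_setdefault_self d k [] []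
  · rw [pv_getD_eq_get?, pv_getD_eq_get?, PySem.Dict.get?_setdefault_of_ne d [] hk]

theorem pv_sorted_self (l : List (Int × List Int)) (h : l.Pairwise (fun a b => a.1 < b.1)) :
    PySem.List.sorted l (fun p => p.1) false = l :=
  PySem.List.sorted_eq_self_of_pairwise l (fun p => p.1) (h.imp le_of_lt)

theorem pv_sorted_items_lt {ν : Type} (d : PySem.Dict Int ν) (h : d.keys.Nodup) :
    (PySem.List.sorted d.items (fun p => p.1) false).Pairwise (fun a b => a.1 < b.1) := by
  have hle := PySem.List.sorted_pairwise d.items (fun p => p.1)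
  have hperm : (PySem.List.sorted d.items (fun p => p.1) false).Perm d.items :=
    PySem.List.sorted_perm d.items (fun p => p.1) false
  have hkeys : d.items.map (fun p => p.1) = d.keys := rfl
  have hnd : ((PySem.List.sorted d.items (fun p => p.1) false).map (fun p => p.1)).Nodup :=
    ((hperm.map (fun p => p.1)).nodup_iff).2 (hkeys ▸ h)
  have hne : (PySem.List.sorted d.items (fun p => p.1) false).Pairwise (fun a b => a.1 ≠ b.1) :=
    List.pairwise_map.mp hnd
  exact (hle.and hne).imp (fun hab => lt_of_le_of_ne hab.1 hab.2)

theorem pv_norm_pairwise (raw : List (Int × List Int)) :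
    (pvNormalizar raw).Pairwise (fun a b => a.1 < b.1) := by
  unfold pvNormalizar
  have hkeys : ((PySem.Dict.ofList raw).items.foldl
      (fun d kv => d.modify kv.1 [] (fun bucket => kv.2.foldl (fun b v => PySem.Set.add b v) bucket))
      (PySem.Dict.empty : PySem.Dict Int (PySem.Set Int))).keys.Nodup := by
    have := PySem.Dict.nodup_keys_foldl_modify_key (l := (PySem.Dict.ofList raw).items)
      (key := fun kv => kv.1) (d0 := ([] : PySem.Set Int))
      (f := fun _ kv => (fun bucket => kv.2.foldl (fun b v => PySem.Set.add b v) bucket))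
      (d := PySem.Dict.empty) (by simp [PySem.Dict.empty])
    exact this
  exact List.pairwise_map.mpr (pv_sorted_items_lt _ hkeys)

theorem pv_ofList_eq_nil_iff (xs : List Int) : PySem.Set.ofList xs = [] ↔ xs = [] := by
  constructor
  · intro h
    rw [List.eq_nil_iff_forall_not_mem]
    intro x hx
    exact (List.eq_nil_iff_forall_not_mem.mp h x) ((PySem.Set.mem_ofList xs x).2 hx)
  · intro h; subst h; rfl

-- ---- characterisation of the seeding passes ----

theorem pv_contains_foldl_setdefault (vals : List Int) (sem : Int) :
    ∀ (a : PySem.Dict Int Int) (x : Int),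
      ((vals.foldl (fun a s => a.setdefault s sem) a).contains x = true) ↔
        (a.contains x = true ∨ x ∈ vals) := by
  induction vals with
  | nil => simp
  | cons v t ih =>
    intro a x
    rw [List.foldl_cons, ih]
    rw [PySem.Dict.contains_setdefault]
    simp only [Bool.or_eq_true, beq_iff_eq, List.mem_cons]
    tauto

theorem pv_contains_asign0 (prev : List (Int × List Int)) :
    ∀ (a : PySem.Dict Int Int) (x : Int),
      ((prev.foldl (fun a p => p.2.foldl (fun a s => a.setdefault s p.1) a) a).contains x = true) ↔
        (a.contains x = true ∨ ∃ p ∈ prev, x ∈ p.2) := by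
  induction prev with
  | nil => simp
  | cons q t ih =>
    intro a x
    rw [List.foldl_cons, ih, pv_contains_foldl_setdefault]
    simp only [List.mem_cons]
    constructor
    · rintro ((h | h) | ⟨p, hp, hx⟩)
      · exact Or.inl h
      · exact Or.inr ⟨q, Or.inl rfl, h⟩
      · exact Or.inr ⟨p, Or.inr hp, hx⟩
    · rintro (h | ⟨p, (rfl | hp), hx⟩)
      · exact Or.inl (Or.inl h)
      · exact Or.inl (Or.inr hx)
      · exact Or.inr ⟨p, hp, hx⟩

theorem pv_mem_seed_set (prev : List (Int × List Int)) :
    ∀ (b : PySem.Set Int) (x : Int),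
      x ∈ prev.foldl (fun s p => PySem.Set.update s p.2) b ↔ (x ∈ b ∨ ∃ p ∈ prev, x ∈ p.2) := by
  induction prev with
  | nil => simp
  | cons q t ih =>
    intro b x
    rw [List.foldl_cons, ih, PySem.Set.mem_update]
    simp only [List.mem_cons]
    constructor
    · rintro ((h | h) | ⟨p, hp, hx⟩)
      · exact Or.inl h
      · exact Or.inr ⟨q, Or.inl rfl, h⟩
      · exact Or.inr ⟨p, Or.inr hp, hx⟩
    · rintro (h | ⟨p, (rfl | hp), hx⟩)
      · exact Or.inl (Or.inl h)
      · exact Or.inl (Or.inr hx)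
      · exact Or.inr ⟨p, hp, hx⟩

theorem pv_seed_getD (prev : List (Int × List Int)) :
    ∀ (dA : PySem.Dict Int (List Int)) (dB : PySem.Dict Int (PySem.Set Int)),
      (∀ k v, v ∈ dA.getD k [] ↔ v ∈ dB.getD k []) →
      ∀ (k v : Int),
        v ∈ (prev.foldl (fun d p => d.insert p.1 p.2) dA).getD k [] ↔
        v ∈ (prev.foldl (fun d p => d.insert p.1 (PySem.Set.ofList p.2)) dB).getD k [] := by
  induction prev with
  | nil => intro dA dB h k v; exact h k v
  | cons q t ih =>
    intro dA dB h k v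
    rw [List.foldl_cons, List.foldl_cons]
    refine ih _ _ (fun k v => ?_) k v
    by_cases hk : k = q.1
    · subst hk
      rw [PySem.Dict.getD_insert_self, PySem.Dict.getD_insert_self, PySem.Set.mem_ofList]
    · rw [PySem.Dict.getD_insert_of_ne dA _ _ hk, PySem.Dict.getD_insert_of_ne dB _ _ hk]
      exact h k v

theorem pv_seed_mem_imp (prev : List (Int × List Int)) :
    ∀ (dA : PySem.Dict Int (List Int)) (k v : Int),
      v ∈ (prev.foldl (fun d p => d.insert p.1 p.2) dA).getD k [] →
        (∃ p ∈ prev, v ∈ p.2) ∨ v ∈ dA.getD k [] := by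
  induction prev with
  | nil => intro dA k v h; exact Or.inr h
  | cons q t ih =>
    intro dA k v h
    rw [List.foldl_cons] at h
    rcases ih _ k v h with h' | h'
    · obtain ⟨p, hp, hv⟩ := h'
      exact Or.inl ⟨p, List.mem_cons_of_mem _ hp, hv⟩
    · by_cases hk : k = q.1
      · subst hk
        rw [PySem.Dict.getD_insert_self] at h'
        exact Or.inl ⟨q, List.mem_cons_self .., h'⟩
      · rw [PySem.Dict.getD_insert_of_ne dA _ _ hk] at h'
        exact Or.inr h'

theorem pv_seed_nodup (prev : List (Int × List Int)) :
    ∀ (dB : PySem.Dict Int (PySem.Set Int)), (∀ k, (dB.getD k []).Nodup) →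
      ∀ k, ((prev.foldl (fun d p => d.insert p.1 (PySem.Set.ofList p.2)) dB).getD k []).Nodup := by
  induction prev with
  | nil => intro dB h k; exact h k
  | cons q t ih =>
    intro dB h k
    rw [List.foldl_cons]
    refine ih _ (fun k => ?_) k
    by_cases hk : k = q.1
    · subst hk; rw [PySem.Dict.getD_insert_self]; exact PySem.Set.nodup_ofList _
    · rw [PySem.Dict.getD_insert_of_ne dB _ _ hk]; exact h k

theorem pv_getD_setdefault_pass (ks : List Int) :
    ∀ (d : PySem.Dict Int (List Int)) (k : Int),
      ((ks.foldl (fun d sem => d.setdefault sem (d.getD sem [])) d).getD k []) = d.getD k [] := by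
  induction ks with
  | nil => intro d k; rfl
  | cons j t ih =>
    intro d k
    rw [List.foldl_cons, ih]
    by_cases hk : k = j
    · subst hk
      rw [PySem.Dict.getD_setdefault_self]
      rw [pv_getD_eq_get?, pv_getD_eq_get?]
      cases d.get? k <;> rfl
    · rw [pv_getD_eq_get? (d.setdefault j (d.getD j [])) k [],
        PySem.Dict.get?_setdefault_of_ne d _ hk]
      exact (pv_getD_eq_get? d k []).symm

theorem pv_keys_nodup_setdefault_pass (ks : List Int) :
    ∀ (d : PySem.Dict Int (List Int)), d.keys.Nodup →
      ((ks.foldl (fun d sem => d.setdefault sem (d.getD sem [])) d)).keys.Nodup := by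
  induction ks with
  | nil => intro d h; exact h
  | cons j t ih =>
    intro d h
    rw [List.foldl_cons]
    exact ih _ (pv_keys_nodup_setdefault d j _ h)

-- ---- the main loop preserves pvRel ----

theorem pv_inner (sem : Int) (vals : List Int) :
    ∀ (outA : PySem.Dict Int (List Int)) (asA : PySem.Dict Int Int) (bset : PySem.Set Int)
      (resB : PySem.Dict Int (PySem.Set Int)) (asB : PySem.Set Int),
      pvRel outA asA resB asB → (∀ v ∈ bset, asA.contains v = true) →
      pvRel (vals.foldl (pvStepA sem) (outA, asA, bset)).1
            (vals.foldl (pvStepA sem) (outA, asA, bset)).2.1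
            (vals.foldl (pvStepB sem) (resB, asB)).1
            (vals.foldl (pvStepB sem) (resB, asB)).2 := by
  induction vals with
  | nil => intro outA asA bset resB asB h hb; exact h
  | cons s t ih =>
    intro outA asA bset resB asB h hb
    obtain ⟨h1, h2, h3, h4, h5, h6⟩ := h
    rw [List.foldl_cons, List.foldl_cons]
    by_cases hc : asA.contains s = true
    · have hmemB : s ∈ asB := (h1 s).1 hc
      have hsb : PySem.Set.contains asB s = true := (PySem.Set.contains_iff asB s).2 hmemB
      rw [show pvStepA sem (outA, asA, bset) s = (outA, asA, bset) by simp [pvStepA, hc]]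
      rw [show pvStepB sem (resB, asB) s = (resB, asB) by simp [pvStepB, hmemB]]
      exact ih outA asA bset resB asB ⟨h1, h2, h3, h4, h5, h6⟩ hb
    · have hsB : s ∉ asB := fun hm => hc ((h1 s).2 hm)
      have hsb : PySem.Set.contains asB s = false := by
        by_contra hx
        exact hsB ((PySem.Set.contains_iff asB s).1 (by revert hx; cases PySem.Set.contains asB s <;> simp))
      have hbs : PySem.Set.contains bset s = false := by
        by_contra hx
        have : s ∈ bset := (PySem.Set.contains_iff bset s).1 (by revert hx; cases PySem.Set.contains bset s <;> simp)
        exact hc (hb s this)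
      have hnbset : s ∉ bset := fun hm => hc (hb s hm)
      rw [show pvStepA sem (outA, asA, bset) s
            = (outA.modify sem [] (fun b => b ++ [s]), asA.insert s sem, PySem.Set.add bset s) by
          simp [pvStepA, hc, hnbset]]
      rw [show pvStepB sem (resB, asB) s
            = (resB.modify sem [] (fun b => PySem.Set.add b s), PySem.Set.add asB s) by
          simp [pvStepB, hsB]]
      refine ih _ _ _ _ _ ⟨?_, ?_, ?_, ?_, ?_, ?_⟩ ?_
      · intro x
        rw [PySem.Dict.contains_insert]
        simp only [Bool.or_eq_true, beq_iff_eq, PySem.Set.mem_add]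
        rw [h1 x]; tauto
      · intro k v
        by_cases hk : k = sem
        · subst hk
          rw [PySem.Dict.getD_modify_self, PySem.Dict.getD_modify_self]
          simp only [List.mem_append, List.mem_singleton, PySem.Set.mem_add]
          rw [h2 k v]
        · rw [PySem.Dict.getD_modify_of_ne _ _ _ hk, PySem.Dict.getD_modify_of_ne _ _ _ hk]
          exact h2 k v
      · intro k v hv
        rw [PySem.Dict.contains_insert]
        simp only [Bool.or_eq_true, beq_iff_eq]
        by_cases hk : k = sem
        · subst hk
          rw [PySem.Dict.getD_modify_self] at hv
          rcases List.mem_append.1 hv with hv | hv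
          · exact Or.inr (h3 k v hv)
          · exact Or.inl (List.mem_singleton.1 hv)
        · rw [PySem.Dict.getD_modify_of_ne _ _ _ hk] at hv
          exact Or.inr (h3 k v hv)
      · intro k
        by_cases hk : k = sem
        · subst hk
          rw [PySem.Dict.getD_modify_self]
          exact PySem.Set.nodup_add _ _ (h4 k)
        · rw [PySem.Dict.getD_modify_of_ne _ _ _ hk]
          exact h4 k
      · exact pv_keys_nodup_modify _ _ _ _ h5
      · exact pv_keys_nodup_modify _ _ _ _ h6
      · intro v hv
        rcases (PySem.Set.mem_add bset s v).1 hv with hv | rfl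
        · rw [PySem.Dict.contains_insert]
          simp only [Bool.or_eq_true, beq_iff_eq]
          exact Or.inr (hb v hv)
        · rw [PySem.Dict.contains_insert]
          simp

theorem pv_week (p : Int × List Int)
    (outA : PySem.Dict Int (List Int)) (asA : PySem.Dict Int Int)
    (resB : PySem.Dict Int (PySem.Set Int)) (asB : PySem.Set Int)
    (h : pvRel outA asA resB asB) :
    pvRel (pvWeekA (outA, asA) p).1 (pvWeekA (outA, asA) p).2
          (p.2.foldl (pvStepB p.1) (resB, asB)).1 (p.2.foldl (pvStepB p.1) (resB, asB)).2 := by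
  obtain ⟨h1, h2, h3, h4, h5, h6⟩ := h
  unfold pvWeekA
  have hout : ∀ k, (outA.setdefault p.1 []).getD k [] = outA.getD k [] :=
    fun k => pv_getD_setdefault_nil outA p.1 k
  have h' : pvRel (outA.setdefault p.1 []) asA resB asB := by
    refine ⟨h1, fun k v => ?_, fun k v hv => ?_, h4, pv_keys_nodup_setdefault _ _ _ h5, h6⟩
    · rw [hout k]; exact h2 k v
    · rw [hout k] at hv; exact h3 k v hv
  have hb : ∀ v ∈ PySem.Set.ofList ((outA.setdefault p.1 []).getD p.1 []), asA.contains v = true := by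
    intro v hv
    have := (PySem.Set.mem_ofList _ v).1 hv
    rw [hout p.1] at this
    exact h3 p.1 v this
  exact pv_inner p.1 p.2 _ _ _ _ _ h' hb

theorem pv_outer (cur : List (Int × List Int)) :
    ∀ (outA : PySem.Dict Int (List Int)) (asA : PySem.Dict Int Int)
      (resB : PySem.Dict Int (PySem.Set Int)) (asB : PySem.Set Int),
      pvRel outA asA resB asB →
      pvRel (cur.foldl pvWeekA (outA, asA)).1 (cur.foldl pvWeekA (outA, asA)).2
            (cur.foldl (fun st p => p.2.foldl (pvStepB p.1) st) (resB, asB)).1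
            (cur.foldl (fun st p => p.2.foldl (pvStepB p.1) st) (resB, asB)).2 := by
  induction cur with
  | nil => intro outA asA resB asB h; exact h
  | cons q t ih =>
    intro outA asA resB asB h
    rw [List.foldl_cons, List.foldl_cons]
    have := pv_week q outA asA resB asB h
    exact ih _ _ _ _ this

-- ---- the two emission passes agree given pvRel ----

theorem pv_emitA_restructure (l : List (Int × List Int)) :
    ∀ (d : PySem.Dict Int (List Int)),
      l.foldl (fun d p =>
          if PySem.List.sorted (PySem.Set.ofList p.2) (fun x => x) false ≠ []
          then d.insert p.1 (PySem.List.sorted (PySem.Set.ofList p.2) (fun x => x) false) else d) d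
      = (l.filter (fun p => decide (p.2 ≠ []))).foldl
          (fun d p => d.insert p.1 (PySem.List.sorted (PySem.Set.ofList p.2) (fun x => x) false)) d := by
  induction l with
  | nil => intro d; rfl
  | cons q t ih =>
    intro d
    by_cases hq : q.2 = []
    · have hs : PySem.List.sorted (PySem.Set.ofList q.2) (fun x => x) false = [] := by
        rw [PySem.List.sorted_eq_nil_iff, pv_ofList_eq_nil_iff]; exact hq
      have h1 : (if PySem.List.sorted (PySem.Set.ofList q.2) (fun x => x) false ≠ []
          then d.insert q.1 (PySem.List.sorted (PySem.Set.ofList q.2) (fun x => x) false) else d) = d :=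
        if_neg (fun hC => hC hs)
      have h2 : (q :: t).filter (fun p => decide (p.2 ≠ [])) = t.filter (fun p => decide (p.2 ≠ [])) := by
        simp [hq]
      rw [List.foldl_cons, h1, h2]
      exact ih d
    · have hne : PySem.List.sorted (PySem.Set.ofList q.2) (fun x => x) false ≠ [] := by
        rw [ne_eq, PySem.List.sorted_eq_nil_iff, pv_ofList_eq_nil_iff]; exact hq
      have h1 : (if PySem.List.sorted (PySem.Set.ofList q.2) (fun x => x) false ≠ []
          then d.insert q.1 (PySem.List.sorted (PySem.Set.ofList q.2) (fun x => x) false) else d)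
          = d.insert q.1 (PySem.List.sorted (PySem.Set.ofList q.2) (fun x => x) false) :=
        if_pos hne
      have h2 : (q :: t).filter (fun p => decide (p.2 ≠ [])) = q :: t.filter (fun p => decide (p.2 ≠ [])) := by
        simp [hq]
      rw [List.foldl_cons, h1, h2, List.foldl_cons]
      exact ih _

theorem pv_emitB_restructure (l : List (Int × List Int)) (acc : List (Int × List Int)) :
    l.foldl (fun acc p =>
        if p.2 ≠ [] then acc ++ [(p.1, PySem.List.sorted p.2 (fun x => x) false)] else acc) acc
    = acc ++ (l.filter (fun p => decide (p.2 ≠ []))).map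
        (fun p => (p.1, PySem.List.sorted p.2 (fun x => x) false)) := by
  have hfun : (fun (acc : List (Int × List Int)) (p : Int × List Int) =>
      if p.2 ≠ [] then acc ++ [(p.1, PySem.List.sorted p.2 (fun x => x) false)] else acc)
      = (fun acc p => if (fun (p : Int × List Int) => decide (p.2 ≠ [])) p = true
          then acc ++ [(fun (p : Int × List Int) => (p.1, PySem.List.sorted p.2 (fun x => x) false)) p] else acc) := by
    funext acc p
    by_cases h : p.2 = [] <;> simp [h]
  rw [hfun, PySem.List.foldl_append_if]

theorem pv_pairwise_lt_nodup (l : List (Int × List Int))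
    (h : l.Pairwise (fun a b => a.1 < b.1)) : l.Nodup :=
  h.imp (fun hab => by intro he; rw [he] at hab; exact lt_irrefl _ hab)

theorem pv_emit_eq (dA : PySem.Dict Int (List Int)) (dB : PySem.Dict Int (PySem.Set Int))
    (hmem : ∀ k v, v ∈ dA.getD k [] ↔ v ∈ dB.getD k [])
    (hnd : ∀ k, (dB.getD k []).Nodup) (hA : dA.keys.Nodup) (hB : dB.keys.Nodup) :
    ((PySem.List.sorted dA.items (fun p => p.1) false).filter (fun p => decide (p.2 ≠ []))).map
        (fun p => (p.1, PySem.List.sorted (PySem.Set.ofList p.2) (fun x => x) false))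
    = ((PySem.List.sorted dB.items (fun p => p.1) false).filter (fun p => decide (p.2 ≠ []))).map
        (fun p => (p.1, PySem.List.sorted p.2 (fun x => x) false)) := by
  have hval : ∀ k : Int, PySem.List.sorted (PySem.Set.ofList (dA.getD k [])) (fun x => x) false
      = PySem.List.sorted (dB.getD k []) (fun x => x) false := by
    intro k
    refine PySem.List.sorted_eq_sorted_of_perm _ _ (fun x => x) (fun a b h => h) ?_
    refine (List.perm_ext_iff_of_nodup (PySem.Set.nodup_ofList _) (hnd k)).2 (fun v => ?_)
    rw [PySem.Set.mem_ofList]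
    exact hmem k v
  have hnonnil : ∀ k : Int, dA.getD k [] ≠ [] ↔ dB.getD k [] ≠ [] := by
    intro k
    constructor
    · intro h h'
      refine h (List.eq_nil_iff_forall_not_mem.2 (fun v hv => ?_))
      exact List.eq_nil_iff_forall_not_mem.1 h' v ((hmem k v).1 hv)
    · intro h h'
      refine h (List.eq_nil_iff_forall_not_mem.2 (fun v hv => ?_))
      exact List.eq_nil_iff_forall_not_mem.1 h' v ((hmem k v).2 hv)
  have hmemA : ∀ x : Int × List Int,
      (x ∈ ((PySem.List.sorted dA.items (fun p => p.1) false).filter (fun p => decide (p.2 ≠ []))).map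
        (fun p => (p.1, PySem.List.sorted (PySem.Set.ofList p.2) (fun x => x) false))) ↔
      (∃ k : Int, dA.getD k [] ≠ [] ∧
        x = (k, PySem.List.sorted (PySem.Set.ofList (dA.getD k [])) (fun x => x) false)) := by
    intro x
    simp only [List.mem_map, List.mem_filter, PySem.List.mem_sorted]
    constructor
    · rintro ⟨p, ⟨hp, hc⟩, rfl⟩
      rw [PySem.Dict.items_eq_map_keys dA hA []] at hp
      obtain ⟨k, hk, rfl⟩ := List.mem_map.1 hp
      exact ⟨k, by simpa using hc, rfl⟩
    · rintro ⟨k, hk, rfl⟩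
      have hkm : k ∈ dA.keys := by
        by_contra hkm
        exact hk (by rw [pv_getD_eq_get?, (PySem.Dict.get?_eq_none_iff_not_mem_keys dA k).2 hkm]; rfl)
      refine ⟨(k, dA.getD k []), ⟨?_, by simpa using hk⟩, rfl⟩
      rw [PySem.Dict.items_eq_map_keys dA hA []]
      exact List.mem_map.2 ⟨k, hkm, rfl⟩
  have hmemB : ∀ x : Int × List Int,
      (x ∈ ((PySem.List.sorted dB.items (fun p => p.1) false).filter (fun p => decide (p.2 ≠ []))).map
        (fun p => (p.1, PySem.List.sorted p.2 (fun x => x) false))) ↔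
      (∃ k : Int, dB.getD k [] ≠ [] ∧
        x = (k, PySem.List.sorted (dB.getD k []) (fun x => x) false)) := by
    intro x
    simp only [List.mem_map, List.mem_filter, PySem.List.mem_sorted]
    constructor
    · rintro ⟨p, ⟨hp, hc⟩, rfl⟩
      rw [PySem.Dict.items_eq_map_keys dB hB []] at hp
      obtain ⟨k, hk, rfl⟩ := List.mem_map.1 hp
      exact ⟨k, by simpa using hc, rfl⟩
    · rintro ⟨k, hk, rfl⟩
      have hkm : k ∈ dB.keys := by
        by_contra hkm
        exact hk (by rw [pv_getD_eq_get?, (PySem.Dict.get?_eq_none_iff_not_mem_keys dB k).2 hkm]; rfl)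
      refine ⟨(k, dB.getD k []), ⟨?_, by simpa using hk⟩, rfl⟩
      rw [PySem.Dict.items_eq_map_keys dB hB []]
      exact List.mem_map.2 ⟨k, hkm, rfl⟩
  have hplA : (((PySem.List.sorted dA.items (fun p => p.1) false).filter (fun p => decide (p.2 ≠ []))).map
      (fun p => (p.1, PySem.List.sorted (PySem.Set.ofList p.2) (fun x => x) false))).Pairwise
        (fun a b => a.1 < b.1) := by
    refine List.pairwise_map.2 ?_
    exact ((pv_sorted_items_lt dA hA).filter _)
  have hplB : (((PySem.List.sorted dB.items (fun p => p.1) false).filter (fun p => decide (p.2 ≠ []))).map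
      (fun p => (p.1, PySem.List.sorted p.2 (fun x => x) false))).Pairwise
        (fun a b => a.1 < b.1) := by
    refine List.pairwise_map.2 ?_
    exact ((pv_sorted_items_lt dB hB).filter _)
  have hperm : (((PySem.List.sorted dA.items (fun p => p.1) false).filter (fun p => decide (p.2 ≠ []))).map
      (fun p => (p.1, PySem.List.sorted (PySem.Set.ofList p.2) (fun x => x) false))).Perm
      (((PySem.List.sorted dB.items (fun p => p.1) false).filter (fun p => decide (p.2 ≠ []))).map
      (fun p => (p.1, PySem.List.sorted p.2 (fun x => x) false))) := by
    refine (List.perm_ext_iff_of_nodup (pv_pairwise_lt_nodup _ hplA) (pv_pairwise_lt_nodup _ hplB)).2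
      (fun x => ?_)
    rw [hmemA x, hmemB x]
    constructor
    · rintro ⟨k, hk, rfl⟩
      exact ⟨k, (hnonnil k).1 hk, by rw [hval k]⟩
    · rintro ⟨k, hk, rfl⟩
      exact ⟨k, (hnonnil k).2 hk, by rw [hval k]⟩
  exact List.Perm.eq_of_pairwise
    (fun a b _ _ hab hba => absurd hba (not_lt_of_gt hab)) hplA hplB hperm

theorem pv_emit_final (dA : PySem.Dict Int (List Int)) (dB : PySem.Dict Int (PySem.Set Int))
    (hmem : ∀ k v, v ∈ dA.getD k [] ↔ v ∈ dB.getD k [])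
    (hnd : ∀ k, (dB.getD k []).Nodup) (hA : dA.keys.Nodup) (hB : dB.keys.Nodup) :
    (List.foldl (fun d p => d.insert p.1 (PySem.List.sorted (PySem.Set.ofList p.2) (fun x => x) false))
        PySem.Dict.empty
        ((PySem.List.sorted dA.items (fun p => p.1) false).filter (fun p => decide (p.2 ≠ [])))).items
    = List.foldl (fun acc p =>
          if p.2 ≠ [] then acc ++ [(p.1, PySem.List.sorted p.2 (fun x => x) false)] else acc) []
        (PySem.List.sorted dB.items (fun p => p.1) false) := by
  rw [pv_emitB_restructure]
  have hfresh : ∀ a ∈ ((PySem.List.sorted dA.items (fun p => p.1) false).filter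
      (fun p => decide (p.2 ≠ []))),
      (PySem.Dict.empty : PySem.Dict Int (List Int)).contains a.1 = false := fun a _ => rfl
  have hnodup : (((PySem.List.sorted dA.items (fun p => p.1) false).filter
      (fun p => decide (p.2 ≠ []))).map (fun p => p.1)).Nodup :=
    List.pairwise_map.mpr (((pv_sorted_items_lt dA hA).filter _).imp (fun h => ne_of_lt h))
  rw [PySem.Dict.items_foldl_insert_fresh
      ((PySem.List.sorted dA.items (fun p => p.1) false).filter (fun p => decide (p.2 ≠ [])))
      (fun p => p.1)
      (fun p => PySem.List.sorted (PySem.Set.ofList p.2) (fun x => x) false)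
      PySem.Dict.empty hfresh hnodup]
  rw [show (PySem.Dict.empty : PySem.Dict Int (List Int)).items = [] from rfl]
  rw [List.nil_append, List.nil_append]
  exact pv_emit_eq dA dB hmem hnd hA hB

theorem pv_AeqMid : ∀ (existentes nuevas : Option (List (Int × List Int))),
    mergear_semanas_sin_pisar_py existentes nuevas = pvMid existentes nuevas := by
  intro existentes nuevas
  unfold mergear_semanas_sin_pisar_py pvMid
  dsimp only
  have hpP : (pvNormalizar (existentes.getD [])).Pairwise (fun a b => a.1 < b.1) := pv_norm_pairwise _
  have hpC : (pvNormalizar (nuevas.getD [])).Pairwise (fun a b => a.1 < b.1) := pv_norm_pairwise _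
  rw [pv_sorted_self _ hpP, pv_sorted_self _ hpC]
  rw [show PySem.List.sorted ((pvNormalizar (nuevas.getD [])).map (fun p => p.1)) (fun x => x) false
        = (pvNormalizar (nuevas.getD [])).map (fun p => p.1) from
      PySem.List.sorted_eq_self_of_pairwise _ _ (List.pairwise_map.2 (hpC.imp le_of_lt))]
  have hseed := PySem.List.foldl_prod_mk
    (fun (d : PySem.Dict Int (PySem.Set Int)) (p : Int × List Int) => d.insert p.1 (PySem.Set.ofList p.2))
    (fun (s : PySem.Set Int) (p : Int × List Int) => PySem.Set.update s p.2)
    (pvNormalizar (existentes.getD [])) PySem.Dict.empty []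
  rw [hseed]
  have hrel : pvRel
      (((pvNormalizar (nuevas.getD [])).map (fun p => p.1)).foldl
        (fun d sem => d.setdefault sem (d.getD sem []))
        ((pvNormalizar (existentes.getD [])).foldl (fun d p => d.insert p.1 p.2) PySem.Dict.empty))
      ((pvNormalizar (existentes.getD [])).foldl
        (fun a p => p.2.foldl (fun a s => a.setdefault s p.1) a) PySem.Dict.empty)
      ((pvNormalizar (existentes.getD [])).foldl
        (fun d p => d.insert p.1 (PySem.Set.ofList p.2)) PySem.Dict.empty)
      ((pvNormalizar (existentes.getD [])).foldl (fun s p => PySem.Set.update s p.2) []) := by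
    refine ⟨?_, ?_, ?_, ?_, ?_, ?_⟩
    · intro x
      rw [pv_contains_asign0, pv_mem_seed_set]
      simp [PySem.Dict.empty]
    · intro k v
      rw [pv_getD_setdefault_pass]
      exact pv_seed_getD _ PySem.Dict.empty PySem.Dict.empty (fun k v => Iff.rfl) k v
    · intro k v hv
      rw [pv_getD_setdefault_pass] at hv
      rcases pv_seed_mem_imp _ PySem.Dict.empty k v hv with h | h
      · rw [pv_contains_asign0]
        simp only [PySem.Dict.empty]
        right; exact h
      · exact absurd h (List.not_mem_nil)
    · exact pv_seed_nodup _ PySem.Dict.empty (fun k => List.nodup_nil)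
    · refine pv_keys_nodup_setdefault_pass _ _ ?_
      exact PySem.Dict.nodup_keys_foldl_insert_key _ (fun p => p.1)
        (fun (_ : PySem.Dict Int (List Int)) (p : Int × List Int) => p.2) PySem.Dict.empty
        (show (PySem.Dict.empty : PySem.Dict Int (List Int)).keys.Nodup from List.nodup_nil)
    · exact PySem.Dict.nodup_keys_foldl_insert_key _ (fun p => p.1)
        (fun (_ : PySem.Dict Int (PySem.Set Int)) (p : Int × List Int) => PySem.Set.ofList p.2)
        PySem.Dict.empty
        (show (PySem.Dict.empty : PySem.Dict Int (PySem.Set Int)).keys.Nodup from List.nodup_nil)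
  obtain ⟨h1', h2', h3', h4', h5', h6'⟩ := pv_outer (pvNormalizar (nuevas.getD [])) _ _ _ _ hrel
  rw [pv_emitA_restructure]
  exact pv_emit_final _ _ h2' h4' h5' h6'

-- ---- pvMid = B: both dicts hold, per week, the prev bucket plus the sorteos whose
-- ---- first cur week (and none of prev) is that week ----

def pvFirstWeek (cur : List (Int × List Int)) (s : Int) : Option Int :=
  (cur.find? (fun p => decide (s ∈ p.2))).map (fun p => p.1)

theorem pvFirstWeek_cons (q : Int × List Int) (t : List (Int × List Int)) (s : Int) :
    pvFirstWeek (q :: t) s = if s ∈ q.2 then some q.1 else pvFirstWeek t s := by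
  by_cases h : s ∈ q.2 <;> simp [pvFirstWeek, h]

theorem pv_innerB_as (sem : Int) (vals : List Int) :
    ∀ (res : PySem.Dict Int (PySem.Set Int)) (asB : PySem.Set Int) (v : Int),
      v ∈ (vals.foldl (pvStepB sem) (res, asB)).2 ↔ v ∈ asB ∨ v ∈ vals := by
  induction vals with
  | nil => simp
  | cons s t ih =>
    intro res asB v
    rw [List.foldl_cons]
    by_cases hs : s ∈ asB
    · rw [show pvStepB sem (res, asB) s = (res, asB) from by simp [pvStepB, hs], ih]
      simp only [List.mem_cons]
      constructor
      · rintro (h | h)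
        · exact Or.inl h
        · exact Or.inr (Or.inr h)
      · rintro (h | (rfl | h))
        · exact Or.inl h
        · exact Or.inl hs
        · exact Or.inr h
    · rw [show pvStepB sem (res, asB) s
          = (res.modify sem [] (fun b => PySem.Set.add b s), PySem.Set.add asB s) from
        by simp [pvStepB, hs], ih, PySem.Set.mem_add]
      simp only [List.mem_cons]
      tauto

theorem pv_innerB_res (sem : Int) (vals : List Int) :
    ∀ (res : PySem.Dict Int (PySem.Set Int)) (asB : PySem.Set Int) (k v : Int),
      v ∈ (vals.foldl (pvStepB sem) (res, asB)).1.getD k [] ↔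
        v ∈ res.getD k [] ∨ (v ∉ asB ∧ v ∈ vals ∧ k = sem) := by
  induction vals with
  | nil => simp
  | cons s t ih =>
    intro res asB k v
    rw [List.foldl_cons]
    by_cases hs : s ∈ asB
    · rw [show pvStepB sem (res, asB) s = (res, asB) from by simp [pvStepB, hs], ih]
      simp only [List.mem_cons]
      constructor
      · rintro (h | ⟨h1, h2, h3⟩)
        · exact Or.inl h
        · exact Or.inr ⟨h1, Or.inr h2, h3⟩
      · rintro (h | ⟨h1, (rfl | h2), h3⟩)
        · exact Or.inl h
        · exact absurd hs h1
        · exact Or.inr ⟨h1, h2, h3⟩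
    · rw [show pvStepB sem (res, asB) s
          = (res.modify sem [] (fun b => PySem.Set.add b s), PySem.Set.add asB s) from
        by simp [pvStepB, hs], ih]
      have hnas : ∀ x : Int, x ∉ PySem.Set.add asB s ↔ (x ∉ asB ∧ x ≠ s) := by
        intro x
        constructor
        · intro h
          exact ⟨fun hx => h ((PySem.Set.mem_add asB s x).2 (Or.inl hx)),
                 fun hx => h ((PySem.Set.mem_add asB s x).2 (Or.inr hx))⟩
        · rintro ⟨h1, h2⟩ hm
          rcases (PySem.Set.mem_add asB s x).1 hm with h | h
          · exact h1 h
          · exact h2 h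
      by_cases hk : k = sem
      · subst hk
        rw [PySem.Dict.getD_modify_self, PySem.Set.mem_add]
        rw [hnas v]
        simp only [List.mem_cons]
        by_cases hv : v = s
        · subst hv; simp [hs]
        · simp [hv]
      · rw [PySem.Dict.getD_modify_of_ne _ _ _ hk]
        rw [hnas v]
        simp only [List.mem_cons]
        by_cases hv : v = s
        · subst hv; simp [hk]
        · simp [hv]

theorem pv_outerB_res (cur : List (Int × List Int)) :
    ∀ (res : PySem.Dict Int (PySem.Set Int)) (asB : PySem.Set Int) (k v : Int),
      v ∈ (cur.foldl (fun st p => p.2.foldl (pvStepB p.1) st) (res, asB)).1.getD k [] ↔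
        v ∈ res.getD k [] ∨ (v ∉ asB ∧ pvFirstWeek cur v = some k) := by
  induction cur with
  | nil => simp [pvFirstWeek]
  | cons q t ih =>
    intro res asB k v
    rw [List.foldl_cons]
    have h1 := ih (q.2.foldl (pvStepB q.1) (res, asB)).1 (q.2.foldl (pvStepB q.1) (res, asB)).2 k v
    rw [Prod.mk.eta] at h1
    rw [h1, pv_innerB_res, pvFirstWeek_cons]
    have has := pv_innerB_as q.1 q.2 res asB v
    by_cases hq : v ∈ q.2
    · have hvx : v ∈ (q.2.foldl (pvStepB q.1) (res, asB)).2 := has.2 (Or.inr hq)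
      rw [if_pos hq]
      constructor
      · rintro ((h | ⟨h1', h2', h3'⟩) | ⟨h1', _⟩)
        · exact Or.inl h
        · exact Or.inr ⟨h1', by rw [h3']⟩
        · exact absurd hvx h1'
      · rintro (h | ⟨h1', h2'⟩)
        · exact Or.inl (Or.inl h)
        · exact Or.inl (Or.inr ⟨h1', hq, (Option.some.inj h2').symm⟩)
    · have hnx : v ∉ (q.2.foldl (pvStepB q.1) (res, asB)).2 ↔ v ∉ asB := by
        rw [has]; simp [hq]
      rw [if_neg hq, hnx]
      constructor
      · rintro ((h | ⟨h1', h2', h3'⟩) | h)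
        · exact Or.inl h
        · exact absurd h2' hq
        · exact Or.inr h
      · rintro (h | h)
        · exact Or.inl (Or.inl h)
        · exact Or.inr h

theorem pv_innerB_nodup (sem : Int) (vals : List Int) :
    ∀ (res : PySem.Dict Int (PySem.Set Int)) (asB : PySem.Set Int),
      (∀ k, (res.getD k []).Nodup) → res.keys.Nodup →
      (∀ k, ((vals.foldl (pvStepB sem) (res, asB)).1.getD k []).Nodup) ∧
        (vals.foldl (pvStepB sem) (res, asB)).1.keys.Nodup := by
  induction vals with
  | nil => intro res asB h1 h2; exact ⟨h1, h2⟩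
  | cons s t ih =>
    intro res asB h1 h2
    rw [List.foldl_cons]
    by_cases hs : s ∈ asB
    · rw [show pvStepB sem (res, asB) s = (res, asB) from by simp [pvStepB, hs]]
      exact ih res asB h1 h2
    · rw [show pvStepB sem (res, asB) s
          = (res.modify sem [] (fun b => PySem.Set.add b s), PySem.Set.add asB s) from
        by simp [pvStepB, hs]]
      refine ih _ _ (fun k => ?_) (pv_keys_nodup_modify _ _ _ _ h2)
      by_cases hk : k = sem
      · subst hk; rw [PySem.Dict.getD_modify_self]; exact PySem.Set.nodup_add _ _ (h1 k)
      · rw [PySem.Dict.getD_modify_of_ne _ _ _ hk]; exact h1 k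

theorem pv_outerB_nodup (cur : List (Int × List Int)) :
    ∀ (res : PySem.Dict Int (PySem.Set Int)) (asB : PySem.Set Int),
      (∀ k, (res.getD k []).Nodup) → res.keys.Nodup →
      (∀ k, (((cur.foldl (fun st p => p.2.foldl (pvStepB p.1) st) (res, asB)).1).getD k []).Nodup) ∧
        ((cur.foldl (fun st p => p.2.foldl (pvStepB p.1) st) (res, asB)).1).keys.Nodup := by
  induction cur with
  | nil => intro res asB h1 h2; exact ⟨h1, h2⟩
  | cons q t ih =>
    intro res asB h1 h2
    rw [List.foldl_cons]
    obtain ⟨g1, g2⟩ := pv_innerB_nodup q.1 q.2 res asB h1 h2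
    have h1' := ih (q.2.foldl (pvStepB q.1) (res, asB)).1 (q.2.foldl (pvStepB q.1) (res, asB)).2 g1 g2
    rw [Prod.mk.eta] at h1'
    exact h1'

-- week_of characterisation: stores exactly the sorteos outside prev, at their first cur week
theorem pv_innerW (P : PySem.Set Int) (sem : Int) (vals : List Int) :
    ∀ (w : PySem.Dict Int Int), (∀ s k, w.get? s = some k → k ≤ sem) →
      (∀ s k, (vals.foldl (pvStepW P sem) w).get? s = some k → k ≤ sem) ∧
      (∀ s k, (vals.foldl (pvStepW P sem) w).get? s = some k ↔
        w.get? s = some k ∨ (w.get? s = none ∧ s ∉ P ∧ s ∈ vals ∧ k = sem)) := by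
  induction vals with
  | nil => intro w hw; exact ⟨hw, fun s k => by simp⟩
  | cons s0 t ih =>
    intro w hw
    rw [List.foldl_cons]
    by_cases hPmem : s0 ∈ P
    · rw [show pvStepW P sem w s0 = w from by simp [pvStepW, hPmem]]
      obtain ⟨ha, hb⟩ := ih w hw
      refine ⟨ha, fun s k => ?_⟩
      rw [hb s k]
      simp only [List.mem_cons]
      constructor
      · rintro (h | ⟨h1, h2, h3, h4⟩)
        · exact Or.inl h
        · exact Or.inr ⟨h1, h2, Or.inr h3, h4⟩
      · rintro (h | ⟨h1, h2, (rfl | h3), h4⟩)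
        · exact Or.inl h
        · exact absurd hPmem h2
        · exact Or.inr ⟨h1, h2, h3, h4⟩
    · have hPn : s0 ∉ P := hPmem
      cases hg : w.get? s0 with
      | none =>
        rw [show pvStepW P sem w s0 = w.insert s0 sem from by simp [pvStepW, hPn, hg]]
        have hw' : ∀ s k, (w.insert s0 sem).get? s = some k → k ≤ sem := by
          intro s k h
          rw [PySem.Dict.get?_insert] at h
          split_ifs at h with h'
          · cases h; exact le_refl _
          · exact hw s k h
        obtain ⟨ha, hb⟩ := ih _ hw'
        refine ⟨ha, fun s k => ?_⟩
        rw [hb s k, PySem.Dict.get?_insert]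
        by_cases hs : s = s0
        · subst hs
          rw [if_pos rfl]
          constructor
          · rintro (h | ⟨h, _⟩)
            · exact Or.inr ⟨hg, hPn, List.mem_cons_self .., (Option.some.inj h).symm⟩
            · exact absurd h (by simp)
          · rintro (h | ⟨_, _, _, rfl⟩)
            · rw [hg] at h; exact absurd h (by simp)
            · exact Or.inl rfl
        · simp only [if_neg hs, List.mem_cons]
          constructor
          · rintro (h | ⟨h1, h2, h3, h4⟩)
            · exact Or.inl h
            · exact Or.inr ⟨h1, h2, Or.inr h3, h4⟩
          · rintro (h | ⟨h1, h2, (h3 | h3), h4⟩)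
            · exact Or.inl h
            · exact absurd h3 hs
            · exact Or.inr ⟨h1, h2, h3, h4⟩
      | some t0 =>
        have ht0 : ¬ sem < t0 := not_lt.2 (hw s0 t0 hg)
        rw [show pvStepW P sem w s0 = w from by simp [pvStepW, hg, ht0]]
        obtain ⟨ha, hb⟩ := ih w hw
        refine ⟨ha, fun s k => ?_⟩
        rw [hb s k]
        by_cases hs : s = s0
        · subst hs; simp [hg]
        · simp only [List.mem_cons]
          constructor
          · rintro (h | ⟨h1, h2, h3, h4⟩)
            · exact Or.inl h
            · exact Or.inr ⟨h1, h2, Or.inr h3, h4⟩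
          · rintro (h | ⟨h1, h2, (h3 | h3), h4⟩)
            · exact Or.inl h
            · exact absurd h3 hs
            · exact Or.inr ⟨h1, h2, h3, h4⟩

theorem pv_outerW (P : PySem.Set Int) (cur : List (Int × List Int)) :
    cur.Pairwise (fun a b => a.1 < b.1) →
    ∀ (w : PySem.Dict Int Int), (∀ s k, w.get? s = some k → ∀ q ∈ cur, k < q.1) →
      ∀ s k, ((cur.foldl (fun w p => p.2.foldl (pvStepW P p.1) w) w).get? s = some k ↔
        w.get? s = some k ∨ (w.get? s = none ∧ s ∉ P ∧ pvFirstWeek cur s = some k)) := by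
  induction cur with
  | nil => intro _ w _ s k; simp [pvFirstWeek]
  | cons q t ih =>
    intro hpw w hw s k
    rw [List.foldl_cons]
    have hle : ∀ s k, w.get? s = some k → k ≤ q.1 :=
      fun s k h => le_of_lt (hw s k h q (List.mem_cons_self ..))
    obtain ⟨hbound, hchar⟩ := pv_innerW P q.1 q.2 w hle
    have hqlt : ∀ q' ∈ t, q.1 < q'.1 := (List.pairwise_cons.1 hpw).1
    have hw1b : ∀ s k, (q.2.foldl (pvStepW P q.1) w).get? s = some k → ∀ q' ∈ t, k < q'.1 := by
      intro s k h q' hq'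
      rcases (hchar s k).1 h with h' | ⟨_, _, _, rfl⟩
      · exact hw s k h' q' (List.mem_cons_of_mem _ hq')
      · exact hqlt q' hq'
    rw [ih (List.pairwise_cons.1 hpw).2 (q.2.foldl (pvStepW P q.1) w) hw1b s k, hchar s k,
      pvFirstWeek_cons]
    have hnone : (q.2.foldl (pvStepW P q.1) w).get? s = none ↔
        (w.get? s = none ∧ (s ∈ P ∨ s ∉ q.2)) := by
      cases h1 : (q.2.foldl (pvStepW P q.1) w).get? s with
      | some v =>
        rcases (hchar s v).1 h1 with h' | ⟨hn, hp, hm, _⟩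
        · simp [h']
        · simp [hn, hp, hm]
      | none =>
        have hwn : w.get? s = none := by
          cases h2 : w.get? s with
          | none => rfl
          | some v => exact absurd ((hchar s v).2 (Or.inl h2)) (by simp [h1])
        have hnc : ¬ (s ∉ P ∧ s ∈ q.2) := by
          rintro ⟨hp, hm⟩
          exact absurd ((hchar s q.1).2 (Or.inr ⟨hwn, hp, hm, rfl⟩)) (by simp [h1])
        simp only [hwn, true_and, true_iff]
        by_cases hp : s ∈ P
        · exact Or.inl hp
        · exact Or.inr (fun hm => hnc ⟨hp, hm⟩)
    rw [hnone]
    by_cases hq2 : s ∈ q.2 <;> by_cases hsP : s ∈ P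
    · simp [hq2, hsP]
    · simp [hq2, hsP]
      tauto
    · simp [hq2, hsP]
    · simp [hq2, hsP]

theorem pv_stepW_keys_nodup (P : PySem.Set Int) (sem : Int) (vals : List Int) :
    ∀ (w : PySem.Dict Int Int), w.keys.Nodup → (vals.foldl (pvStepW P sem) w).keys.Nodup := by
  induction vals with
  | nil => intro w h; exact h
  | cons s t ih =>
    intro w h
    rw [List.foldl_cons]
    refine ih _ ?_
    by_cases hcond : (!PySem.Set.contains P s &&
        (match w.get? s with | none => true | some t => decide (sem < t))) = true
    · rw [show pvStepW P sem w s = w.insert s sem from by unfold pvStepW; rw [if_pos hcond]]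
      exact PySem.Dict.nodup_keys_insert _ _ _ h
    · rw [show pvStepW P sem w s = w from by unfold pvStepW; rw [if_neg hcond]]
      exact h

theorem pv_weekOf_keys_nodup (P : PySem.Set Int) (cur : List (Int × List Int)) :
    ∀ (w : PySem.Dict Int Int), w.keys.Nodup →
      (cur.foldl (fun w p => p.2.foldl (pvStepW P p.1) w) w).keys.Nodup := by
  induction cur with
  | nil => intro w h; exact h
  | cons q t ih =>
    intro w h
    rw [List.foldl_cons]
    exact ih _ (pv_stepW_keys_nodup P q.1 q.2 w h)

theorem pv_group_mem (l : List (Int × Int)) :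
    ∀ (d : PySem.Dict Int (PySem.Set Int)) (k v : Int),
      v ∈ (l.foldl (fun d q => d.modify q.2 [] (fun b => PySem.Set.add b q.1)) d).getD k [] ↔
        v ∈ d.getD k [] ∨ (v, k) ∈ l := by
  induction l with
  | nil => simp
  | cons q t ih =>
    intro d k v
    rw [List.foldl_cons, ih]
    by_cases hk : k = q.2
    · rw [hk, PySem.Dict.getD_modify_self, PySem.Set.mem_add]
      simp only [List.mem_cons, Prod.ext_iff]
      tauto
    · rw [PySem.Dict.getD_modify_of_ne _ _ _ hk]
      simp only [List.mem_cons, Prod.ext_iff]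
      constructor
      · rintro (h | h)
        · exact Or.inl h
        · exact Or.inr (Or.inr h)
      · rintro (h | (⟨h1, h2⟩ | h))
        · exact Or.inl h
        · exact absurd h2 hk
        · exact Or.inr h

theorem pv_group_nodup (l : List (Int × Int)) :
    ∀ (d : PySem.Dict Int (PySem.Set Int)),
      (∀ k, (d.getD k []).Nodup) → d.keys.Nodup →
      (∀ k, ((l.foldl (fun d q => d.modify q.2 [] (fun b => PySem.Set.add b q.1)) d).getD k []).Nodup) ∧
        (l.foldl (fun d q => d.modify q.2 [] (fun b => PySem.Set.add b q.1)) d).keys.Nodup := by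
  induction l with
  | nil => intro d h1 h2; exact ⟨h1, h2⟩
  | cons q t ih =>
    intro d h1 h2
    rw [List.foldl_cons]
    refine ih _ (fun k => ?_) (pv_keys_nodup_modify _ _ _ _ h2)
    by_cases hk : k = q.2
    · rw [hk, PySem.Dict.getD_modify_self]; exact PySem.Set.nodup_add _ _ (h1 q.2)
    · rw [PySem.Dict.getD_modify_of_ne _ _ _ hk]; exact h1 k

theorem pv_emit_eq_sets (dA dB : PySem.Dict Int (PySem.Set Int))
    (hmem : ∀ k v, v ∈ dA.getD k [] ↔ v ∈ dB.getD k [])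
    (hndA : ∀ k, (dA.getD k []).Nodup) (hndB : ∀ k, (dB.getD k []).Nodup)
    (hA : dA.keys.Nodup) (hB : dB.keys.Nodup) :
    (PySem.List.sorted dA.items (fun p => p.1) false).foldl
      (fun acc p => if p.2 ≠ [] then acc ++ [(p.1, PySem.List.sorted p.2 (fun x => x) false)] else acc) []
    = (PySem.List.sorted dB.items (fun p => p.1) false).foldl
      (fun acc p => if p.2 ≠ [] then acc ++ [(p.1, PySem.List.sorted p.2 (fun x => x) false)] else acc) [] := by
  rw [pv_emitB_restructure, pv_emitB_restructure, List.nil_append, List.nil_append]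
  have hval : ∀ k : Int, PySem.List.sorted (dA.getD k []) (fun x => x) false
      = PySem.List.sorted (dB.getD k []) (fun x => x) false := by
    intro k
    refine PySem.List.sorted_eq_sorted_of_perm _ _ (fun x => x) (fun a b h => h) ?_
    exact (List.perm_ext_iff_of_nodup (hndA k) (hndB k)).2 (fun v => hmem k v)
  have hnonnil : ∀ k : Int, dA.getD k [] ≠ [] ↔ dB.getD k [] ≠ [] := by
    intro k
    constructor
    · intro h h'
      refine h (List.eq_nil_iff_forall_not_mem.2 (fun v hv => ?_))
      exact List.eq_nil_iff_forall_not_mem.1 h' v ((hmem k v).1 hv)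
    · intro h h'
      refine h (List.eq_nil_iff_forall_not_mem.2 (fun v hv => ?_))
      exact List.eq_nil_iff_forall_not_mem.1 h' v ((hmem k v).2 hv)
  have hmemD : ∀ (d : PySem.Dict Int (PySem.Set Int)), d.keys.Nodup → ∀ x : Int × List Int,
      (x ∈ ((PySem.List.sorted d.items (fun p => p.1) false).filter (fun p => decide (p.2 ≠ []))).map
        (fun p => (p.1, PySem.List.sorted p.2 (fun x => x) false))) ↔
      (∃ k : Int, d.getD k [] ≠ [] ∧
        x = (k, PySem.List.sorted (d.getD k []) (fun x => x) false)) := by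
    intro d hD x
    simp only [List.mem_map, List.mem_filter, PySem.List.mem_sorted]
    constructor
    · rintro ⟨p, ⟨hp, hc⟩, rfl⟩
      rw [PySem.Dict.items_eq_map_keys d hD []] at hp
      obtain ⟨k, hk, rfl⟩ := List.mem_map.1 hp
      exact ⟨k, by simpa using hc, rfl⟩
    · rintro ⟨k, hk, rfl⟩
      have hkm : k ∈ d.keys := by
        by_contra hkm
        exact hk (by rw [pv_getD_eq_get?, (PySem.Dict.get?_eq_none_iff_not_mem_keys d k).2 hkm]; rfl)
      refine ⟨(k, d.getD k []), ⟨?_, by simpa using hk⟩, rfl⟩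
      rw [PySem.Dict.items_eq_map_keys d hD []]
      exact List.mem_map.2 ⟨k, hkm, rfl⟩
  have hpl : ∀ (d : PySem.Dict Int (PySem.Set Int)), d.keys.Nodup →
      (((PySem.List.sorted d.items (fun p => p.1) false).filter (fun p => decide (p.2 ≠ []))).map
        (fun p => (p.1, PySem.List.sorted p.2 (fun x => x) false))).Pairwise (fun a b => a.1 < b.1) :=
    fun d hD => List.pairwise_map.2 ((pv_sorted_items_lt d hD).filter _)
  have hperm : (((PySem.List.sorted dA.items (fun p => p.1) false).filter (fun p => decide (p.2 ≠ []))).map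
      (fun p => (p.1, PySem.List.sorted p.2 (fun x => x) false))).Perm
      (((PySem.List.sorted dB.items (fun p => p.1) false).filter (fun p => decide (p.2 ≠ []))).map
      (fun p => (p.1, PySem.List.sorted p.2 (fun x => x) false))) := by
    refine (List.perm_ext_iff_of_nodup (pv_pairwise_lt_nodup _ (hpl dA hA))
      (pv_pairwise_lt_nodup _ (hpl dB hB))).2 (fun x => ?_)
    rw [hmemD dA hA x, hmemD dB hB x]
    constructor
    · rintro ⟨k, hk, rfl⟩
      exact ⟨k, (hnonnil k).1 hk, by rw [hval k]⟩
    · rintro ⟨k, hk, rfl⟩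
      exact ⟨k, (hnonnil k).2 hk, by rw [hval k]⟩
  exact List.Perm.eq_of_pairwise
    (fun a b _ _ hab hba => absurd hba (not_lt_of_gt hab)) (hpl dA hA) (hpl dB hB) hperm

theorem pv_MidEqAlt : ∀ (existentes nuevas : Option (List (Int × List Int))),
    pvMid existentes nuevas = mergear_semanas_sin_pisar_py_alt existentes nuevas := by
  intro existentes nuevas
  unfold pvMid mergear_semanas_sin_pisar_py_alt
  dsimp only
  have hpC : (pvNormalizar (nuevas.getD [])).Pairwise (fun a b => a.1 < b.1) := pv_norm_pairwise _
  rw [pv_sorted_self _ hpC]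
  have hseed := PySem.List.foldl_prod_mk
    (fun (d : PySem.Dict Int (PySem.Set Int)) (p : Int × List Int) => d.insert p.1 (PySem.Set.ofList p.2))
    (fun (s : PySem.Set Int) (p : Int × List Int) => PySem.Set.update s p.2)
    (pvNormalizar (existentes.getD [])) PySem.Dict.empty []
  rw [hseed]
  set prev := pvNormalizar (existentes.getD []) with hprev
  set cur := pvNormalizar (nuevas.getD []) with hcur
  set S := prev.foldl (fun (d : PySem.Dict Int (PySem.Set Int)) p => d.insert p.1 (PySem.Set.ofList p.2))
    PySem.Dict.empty with hS
  set P := prev.foldl (fun (s : PySem.Set Int) p => PySem.Set.update s p.2) [] with hP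
  have hSnd : ∀ k, (S.getD k []).Nodup := pv_seed_nodup prev PySem.Dict.empty (fun k => List.nodup_nil)
  have hSkeys : S.keys.Nodup :=
    PySem.Dict.nodup_keys_foldl_insert_key _ (fun p => p.1)
      (fun (_ : PySem.Dict Int (PySem.Set Int)) (p : Int × List Int) => PySem.Set.ofList p.2)
      PySem.Dict.empty (show (PySem.Dict.empty : PySem.Dict Int (PySem.Set Int)).keys.Nodup from List.nodup_nil)
  have hWkeys : (cur.foldl (fun w p => p.2.foldl (pvStepW P p.1) w) PySem.Dict.empty).keys.Nodup :=
    pv_weekOf_keys_nodup P cur PySem.Dict.empty List.nodup_nil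
  obtain ⟨hD1nd, hD1k⟩ := pv_outerB_nodup cur S P hSnd hSkeys
  obtain ⟨hD2nd, hD2k⟩ := pv_group_nodup
    (cur.foldl (fun w p => p.2.foldl (pvStepW P p.1) w) PySem.Dict.empty).items S hSnd hSkeys
  apply pv_emit_eq_sets _ _ ?_ hD1nd hD2nd hD1k hD2k
  intro k v
  rw [pv_outerB_res, pv_group_mem]
  have hmemitems : ((v, k) ∈ (cur.foldl (fun w p => p.2.foldl (pvStepW P p.1) w) PySem.Dict.empty).items) ↔
      (cur.foldl (fun w p => p.2.foldl (pvStepW P p.1) w) PySem.Dict.empty).get? v = some k :=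
    (PySem.Dict.get?_eq_some_iff_mem_items _ _ _ hWkeys).symm
  rw [hmemitems, pv_outerW P cur hpC PySem.Dict.empty (fun s k h => by simp [PySem.Dict.get?_empty] at h) v k]
  simp [PySem.Dict.get?_empty]

-- ===== VERDICT (by name: the statement is the Claim_ definition above) =====
theorem mergear_semanas_sin_pisar_py_spec : Claim_equal_mergear_semanas_sin_pisar_py := by
  intro e n _
  unfold Spec_mergear_semanas_sin_pisar_py
  rw [pv_AeqMid e n, pv_MidEqAlt e n]
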